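-- pv_equiv track=rewrite | github.com/MarcTatam/hackathon-team-3 | task1.py | min_max_product
-- ===== SOURCE A (Python) =====
-- def min_max_product(arr):
--     smallest = arr[0]
--     biggest = arr[0]
--     for item in arr:
--         if item < smallest:
--             smallest = item
--         elif item > biggest:
--             biggest = item
--
--     return biggest * smallest
-- ===== SOURCE B (Python) =====
-- def min_max_product(arr):
--     s = sorted(arr)
--     return s[0] * s[-1]
-- ===== Notes on version B (the rewrite author's own statement) =====
-- stated objective: alternative
-- what changed: Replaces A's single combined min/max scan (with elif-chained updates) by sorting a copy and multiplying the first and last elements of the sorted list.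
import Mathlib
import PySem

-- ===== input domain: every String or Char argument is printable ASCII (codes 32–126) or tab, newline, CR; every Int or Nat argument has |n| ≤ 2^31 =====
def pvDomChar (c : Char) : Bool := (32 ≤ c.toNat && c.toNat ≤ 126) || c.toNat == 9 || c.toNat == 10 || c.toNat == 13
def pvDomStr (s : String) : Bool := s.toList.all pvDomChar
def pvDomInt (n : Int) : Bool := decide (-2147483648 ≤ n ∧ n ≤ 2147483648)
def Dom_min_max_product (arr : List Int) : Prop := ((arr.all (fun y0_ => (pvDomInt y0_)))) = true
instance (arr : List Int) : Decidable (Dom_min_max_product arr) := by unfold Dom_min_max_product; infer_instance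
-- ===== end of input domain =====

-- B sorts a copy and multiplies the sorted list's first and last elements, instead of A's single elif-chained min/max scan; equal return values on all non-empty lists.


-- ===== PORT A =====
-- the for-loop over arr carrying (smallest, biggest)
def mmLoop : List Int → Int → Int → Int × Int
  | [], smallest, biggest => (smallest, biggest)
  | item :: rest, smallest, biggest =>
      if item < smallest then mmLoop rest item biggest
      else if item > biggest then mmLoop rest smallest item
      else mmLoop rest smallest biggest

def min_max_product (arr : List Int) : Int :=
  match arr with
  | [] => 0  -- arr[0] raises IndexError; excluded by Pre_
  | a :: _ =>
      let p := mmLoop arr a a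
      p.2 * p.1

-- ===== PORT B =====
def min_max_product_alt (arr : List Int) : Int :=
  let s := PySem.List.sorted arr (fun x => x) false
  match s with
  | [] => 0  -- s[0] raises IndexError; excluded by Pre_
  | m :: t => m * t.getLastD m  -- s[0] * s[-1]

-- ===== PRECONDITION & SPEC =====
-- Pre_ excludes exactly the empty list, on which both Pythons raise IndexError.
def Pre_min_max_product (arr : List Int) : Prop := arr ≠ []
instance (arr : List Int) : Decidable (Pre_min_max_product arr) := by unfold Pre_min_max_product; infer_instance
def pvWitness_min_max_product : List Int := ([3, -1, 4])

def Spec_min_max_product (arr : List Int) (out : Int) : Prop := out = min_max_product_alt arr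
instance (arr : List Int) (out : Int) : Decidable (Spec_min_max_product arr out) := by unfold Spec_min_max_product; infer_instance

-- ===== CLAIM (what is proved, stated in full; the proofs are below) =====
def Claim_equal_min_max_product : Prop := ∀ (arr : List Int), Dom_min_max_product arr → Pre_min_max_product arr → Spec_min_max_product arr (min_max_product arr)

-- ===== LEMMAS AND PROOFS =====

-- A's loop computes the running min and max, provided smallest ≤ biggest.
theorem mmLoop_eq_foldl (xs : List Int) (s b : Int) (h : s ≤ b) :
    mmLoop xs s b = (xs.foldl min s, xs.foldl max b) := by
  induction xs generalizing s b with
  | nil => simp [mmLoop]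
  | cons x xs ih =>
      simp only [mmLoop, List.foldl_cons]
      split_ifs with h1 h2
      · rw [ih x b (by omega)]
        congr 1 <;> [skip; skip] <;> congr 1 <;> omega
      · rw [ih s x (by omega)]
        congr 1 <;> congr 1 <;> omega
      · rw [ih s b h]
        congr 1 <;> congr 1 <;> omega

theorem foldl_min_mem (xs : List Int) (s : Int) : xs.foldl min s ∈ s :: xs := by
  induction xs generalizing s with
  | nil => simp
  | cons x xs ih =>
      simp only [List.foldl_cons]
      rcases le_total s x with hl | hl
      · rw [min_eq_left hl]
        rcases List.mem_cons.mp (ih s) with h | h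
        · simp [h]
        · simp [h]
      · rw [min_eq_right hl]
        rcases List.mem_cons.mp (ih x) with h | h
        · simp [h]
        · simp [h]

theorem foldl_min_le (xs : List Int) : ∀ (s y : Int), y ∈ s :: xs → xs.foldl min s ≤ y := by
  induction xs with
  | nil => intro s y hy; rw [List.mem_singleton] at hy; simp [hy]
  | cons x xs ih =>
      intro s y hy
      simp only [List.foldl_cons]
      rw [List.mem_cons, List.mem_cons] at hy
      rcases hy with rfl | rfl | h
      · exact le_trans (ih (min y x) (min y x) (by simp)) (min_le_left _ _)
      · exact le_trans (ih (min s y) (min s y) (by simp)) (min_le_right _ _)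
      · exact ih (min s x) y (by simp [h])

theorem foldl_max_mem (xs : List Int) (b : Int) : xs.foldl max b ∈ b :: xs := by
  induction xs generalizing b with
  | nil => simp
  | cons x xs ih =>
      simp only [List.foldl_cons]
      rcases le_total b x with hl | hl
      · rw [max_eq_right hl]
        rcases List.mem_cons.mp (ih x) with h | h
        · simp [h]
        · simp [h]
      · rw [max_eq_left hl]
        rcases List.mem_cons.mp (ih b) with h | h
        · simp [h]
        · simp [h]

theorem le_foldl_max (xs : List Int) : ∀ (b y : Int), y ∈ b :: xs → y ≤ xs.foldl max b := by
  induction xs with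
  | nil => intro b y hy; rw [List.mem_singleton] at hy; simp [hy]
  | cons x xs ih =>
      intro b y hy
      simp only [List.foldl_cons]
      rw [List.mem_cons, List.mem_cons] at hy
      rcases hy with rfl | rfl | h
      · exact le_trans (le_max_left y x) (ih (max y x) (max y x) (by simp))
      · exact le_trans (le_max_right b y) (ih (max b y) (max b y) (by simp))
      · exact ih (max b x) y (by simp [h])

theorem getLastD_mem' (u : List Int) (m : Int) : u.getLastD m ∈ m :: u := by
  induction u generalizing m with
  | nil => simp
  | cons x u ih =>
      rw [List.getLastD_cons]
      rcases List.mem_cons.mp (ih x) with h | h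
      · rw [h]; simp
      · exact List.mem_cons_of_mem m (List.mem_cons_of_mem x h)

theorem le_getLastD_of_pairwise (u : List Int) (m : Int)
    (hp : (m :: u).Pairwise (· ≤ ·)) : ∀ y ∈ m :: u, y ≤ u.getLastD m := by
  induction u generalizing m with
  | nil => intro y hy; rw [List.mem_singleton] at hy; simp [hy]
  | cons x u ih =>
      intro y hy
      have hmx : m ≤ x := (List.pairwise_cons.mp hp).1 x (by simp)
      have ih' := ih x (List.pairwise_cons.mp hp).2
      rw [List.getLastD_cons]
      rw [List.mem_cons, List.mem_cons] at hy
      rcases hy with rfl | rfl | h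
      · exact le_trans hmx (ih' x (by simp))
      · exact ih' y (by simp)
      · exact ih' y (by simp [h])

theorem min_max_product_main (a : Int) (t : List Int) :
    min_max_product (a :: t) = min_max_product_alt (a :: t) := by
  have hsortne : PySem.List.sorted (a :: t) (fun x => x) false ≠ [] := by
    intro h
    exact (List.cons_ne_nil a t) ((PySem.List.sorted_eq_nil_iff _ _ _).mp h)
  obtain ⟨m, u, hmu⟩ := List.exists_cons_of_ne_nil hsortne
  have hperm : (m :: u).Perm (a :: t) := hmu ▸ PySem.List.sorted_perm _ _ _
  have hmem : ∀ y, y ∈ m :: u ↔ y ∈ a :: t := fun y => hperm.mem_iff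
  have hpair : (m :: u).Pairwise (· ≤ ·) := by
    have := PySem.List.sorted_pairwise (xs := a :: t) (key := fun x => x)
    rw [hmu] at this; simpa using this
  have hA : mmLoop (a :: t) a a = ((a :: t).foldl min a, (a :: t).foldl max a) :=
    mmLoop_eq_foldl _ a a le_rfl
  -- the sorted head is the foldl min
  have hmin : m = (a :: t).foldl min a := by
    apply le_antisymm
    · have hx := PySem.List.key_head_sorted_le (xs := a :: t) (key := fun x => x) hmu
      have hmem' : (a :: t).foldl min a ∈ a :: t := by
        rcases List.mem_cons.mp (foldl_min_mem (a :: t) a) with h | h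
        · rw [h]; simp
        · exact h
      simpa using hx _ hmem'
    · exact foldl_min_le (a :: t) a m (List.mem_cons_of_mem a ((hmem m).mp (by simp)))
  -- the sorted last is the foldl max
  have hmax : u.getLastD m = (a :: t).foldl max a := by
    apply le_antisymm
    · exact le_foldl_max (a :: t) a _ (List.mem_cons_of_mem a ((hmem _).mp (getLastD_mem' u m)))
    · apply le_getLastD_of_pairwise u m hpair
      apply (hmem _).mpr
      rcases List.mem_cons.mp (foldl_max_mem (a :: t) a) with h | h
      · rw [h]; simp
      · exact h
  simp only [min_max_product, min_max_product_alt, hmu, hA]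
  rw [← hmin, ← hmax]
  exact mul_comm _ _

-- ===== VERDICT (by name: the statement is the Claim_ definition above) =====
theorem min_max_product_spec : Claim_equal_min_max_product := by
  intro arr _ hpre
  unfold Spec_min_max_product
  match arr, hpre with
  | a :: t, _ => exact min_max_product_main a t
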